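-- pv_equiv track=rewrite | github.com/iansedano/aoc | python/aoc/2023/15.py | op_add
-- ===== SOURCE A (Python) =====
-- def op_add(label, focal_length, box):
--     out = []
--     op_complete = False
--     for lb, f in box:
--         if lb == label:
--             out.append((label, focal_length))
--             op_complete = True
--         else:
--             out.append((lb, f))
--     if not op_complete:
--         out.append((label, focal_length))
--     return out
-- ===== SOURCE B (Python) =====
-- def op_add(label, focal_length, box):
--     # Recursive two-state decomposition: `seek` scans until the first matching
--     # label; once found, `flush` replaces every matching entry in the remainder.
--     # No flag variable and no trailing conditional append.
--     def flush(items):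
--         if not items:
--             return []
--         (lb, f) = items[0]
--         rest = flush(items[1:])
--         return [(label, focal_length)] + rest if lb == label else [(lb, f)] + rest
--
--     def seek(items):
--         if not items:
--             return [(label, focal_length)]
--         (lb, f) = items[0]
--         if lb == label:
--             return [(label, focal_length)] + flush(items[1:])
--         return [(lb, f)] + seek(items[1:])
--
--     return seek(box)
-- ===== Notes on version B (the rewrite author's own statement) =====
-- stated objective: alternative
-- what changed: Replaces A's iterative flag-tracking accumulator loop with a structural recursion in two states (seek until first match, then flush the tail replacing matches), building the result back-to-front with no flag and no trailing conditional append.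
import Mathlib
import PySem

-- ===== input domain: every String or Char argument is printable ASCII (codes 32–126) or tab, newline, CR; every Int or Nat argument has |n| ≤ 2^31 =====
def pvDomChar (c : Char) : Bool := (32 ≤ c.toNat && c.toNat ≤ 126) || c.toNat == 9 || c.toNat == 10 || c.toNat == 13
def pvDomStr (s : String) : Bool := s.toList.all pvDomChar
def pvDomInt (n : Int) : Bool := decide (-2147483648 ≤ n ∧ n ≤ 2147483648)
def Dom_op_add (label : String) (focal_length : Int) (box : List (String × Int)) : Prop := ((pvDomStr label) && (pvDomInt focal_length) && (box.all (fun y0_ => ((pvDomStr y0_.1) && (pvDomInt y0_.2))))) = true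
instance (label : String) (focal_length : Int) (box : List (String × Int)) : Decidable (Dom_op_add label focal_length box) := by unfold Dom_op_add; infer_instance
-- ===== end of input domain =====

-- B replaces A's iterative flag-tracking accumulator loop with a two-state structural
-- recursion (seek the first match, then flush the tail); objective: alternative, same O(n).

-- ===== PORT A =====
-- one loop accumulating `out` and the `op_complete` flag, then a conditional append
def op_add (label : String) (focal_length : Int) (box : List (String × Int)) : List (String × Int) :=
  let s := box.foldl
    (fun (s : List (String × Int) × Bool) p =>
      if p.1 == label then (s.1 ++ [(label, focal_length)], true)
      else (s.1 ++ [p], s.2))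
    ([], false)
  if !s.2 then s.1 ++ [(label, focal_length)] else s.1

-- ===== PORT B =====
-- `flush`: after the first match, replace every matching entry in the remainder
def opAddFlush (label : String) (focal_length : Int) : List (String × Int) → List (String × Int)
  | [] => []
  | p :: rest =>
    if p.1 == label then (label, focal_length) :: opAddFlush label focal_length rest
    else p :: opAddFlush label focal_length rest

-- `seek`: scan until the first matching label; append at the end if none
def opAddSeek (label : String) (focal_length : Int) : List (String × Int) → List (String × Int)
  | [] => [(label, focal_length)]
  | p :: rest =>
    if p.1 == label then (label, focal_length) :: opAddFlush label focal_length rest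
    else p :: opAddSeek label focal_length rest

def op_add_alt (label : String) (focal_length : Int) (box : List (String × Int)) : List (String × Int) :=
  opAddSeek label focal_length box

-- ===== PRECONDITION & SPEC =====
def Spec_op_add (label : String) (focal_length : Int) (box : List (String × Int)) (out : List (String × Int)) : Prop := out = op_add_alt label focal_length box
instance (label : String) (focal_length : Int) (box : List (String × Int)) (out : List (String × Int)) : Decidable (Spec_op_add label focal_length box out) := by unfold Spec_op_add; infer_instance

-- ===== CLAIM =====
def Claim_equal_op_add : Prop := ∀ (label : String) (focal_length : Int) (box : List (String × Int)), Dom_op_add label focal_length box → Spec_op_add label focal_length box (op_add label focal_length box)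

-- ===== LEMMAS AND PROOFS =====

-- A's fold appends the flush of the list and ORs the flag with "any match".
theorem op_add_foldl_char (label : String) (focal_length : Int) (box : List (String × Int))
    (acc : List (String × Int)) (oc : Bool) :
    box.foldl
      (fun (s : List (String × Int) × Bool) p =>
        if p.1 == label then (s.1 ++ [(label, focal_length)], true)
        else (s.1 ++ [p], s.2))
      (acc, oc)
    = (acc ++ opAddFlush label focal_length box,
       oc || box.any (fun p => p.1 == label)) := by
  induction box generalizing acc oc with
  | nil => simp [opAddFlush]
  | cons hd tl ih =>
    simp only [List.foldl_cons, List.any_cons, opAddFlush]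
    by_cases h : hd.1 == label
    · rw [if_pos h, if_pos h, ih]
      simp [List.append_assoc, h]
    · rw [if_neg h, if_neg h, ih]
      have h' : (hd.1 == label) = false := by simpa using h
      simp [List.append_assoc, h']

-- B's seek equals: flush if some label matches, otherwise identity plus trailing append.
theorem opAddSeek_char (label : String) (focal_length : Int) (box : List (String × Int)) :
    opAddSeek label focal_length box =
      if box.any (fun p => p.1 == label) then opAddFlush label focal_length box
      else box ++ [(label, focal_length)] := by
  induction box with
  | nil => simp [opAddSeek]
  | cons hd tl ih =>
    simp only [opAddSeek, opAddFlush, List.any_cons]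
    by_cases h : hd.1 == label
    · simp [h]
    · simp only [h, Bool.false_or, if_neg h, ih]
      by_cases h2 : tl.any (fun p => p.1 == label) <;> simp [h2]

-- when no label matches, flush is the identity
theorem opAddFlush_id_of_no_match (label : String) (focal_length : Int) (box : List (String × Int))
    (h : box.any (fun p => p.1 == label) = false) :
    opAddFlush label focal_length box = box := by
  induction box with
  | nil => rfl
  | cons hd tl ih =>
    simp only [List.any_cons, Bool.or_eq_false_iff] at h
    simp only [opAddFlush, if_neg (by simp [h.1] : ¬ (hd.1 == label) = true), ih h.2]

-- ===== VERDICT =====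
theorem op_add_spec : Claim_equal_op_add := by
  intro label focal_length box _
  unfold Spec_op_add op_add op_add_alt
  simp only [op_add_foldl_char, List.nil_append, Bool.false_or, opAddSeek_char]
  cases h : box.any (fun p => p.1 == label) with
  | false => simp [h, opAddFlush_id_of_no_match label focal_length box h]
  | true => simp [h]
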